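-- pv_equiv track=rewrite | github.com/sonyacao/Country-Classes | CountryCatalogue.py | correctFormat
-- ===== SOURCE A (Python) =====
-- def correctFormat(line):
--     total = 0
--     for i in range (0, len(line)): #counts how many vertical bars are in the line
--         if line[i] == "|":
--             total +=1
--
--     if total == 0: #if the data file is missing vertical bars, they are added to the end
--         return line + "|||"
--     elif total == 1:
--         return line + "||"
--     elif total == 2:
--         return line + "|"
--     else:
--         return line
-- ===== SOURCE B (Python) =====
-- def correctFormat(line):
--     # Locate up to three successive "|" occurrences by substring search;
--     # the number of searches that fail is the number of bars to append.
--     def missing(need, pos):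
--         if need == 0:
--             return 0
--         i = line.find("|", pos)
--         if i == -1:
--             return need
--         return missing(need - 1, i + 1)
--     return line + "|" * missing(3, 0)
-- ===== Notes on version B (the rewrite author's own statement) =====
-- stated objective: alternative
-- what changed: Instead of counting every bar and mapping the total through a four-way if/elif cascade, B performs up to three substring searches (str.find with a moving start offset) for successive bar occurrences and appends one bar per failed search, stopping as soon as three are located; at most three C-level find calls replace the Python-level per-character loop.
import Mathlib
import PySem

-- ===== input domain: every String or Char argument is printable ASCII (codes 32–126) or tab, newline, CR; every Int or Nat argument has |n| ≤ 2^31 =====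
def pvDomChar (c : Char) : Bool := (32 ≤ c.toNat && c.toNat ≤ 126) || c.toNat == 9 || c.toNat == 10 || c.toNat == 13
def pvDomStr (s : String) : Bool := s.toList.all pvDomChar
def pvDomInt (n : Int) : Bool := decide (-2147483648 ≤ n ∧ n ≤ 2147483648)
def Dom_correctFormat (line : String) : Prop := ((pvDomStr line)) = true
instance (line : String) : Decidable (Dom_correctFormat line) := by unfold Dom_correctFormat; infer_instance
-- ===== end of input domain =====

-- B locates up to three '|' occurrences by successive substring searches (str.find with a
-- moving start) and appends one bar per failed search, instead of A's full bar count fed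
-- through a four-way if/elif cascade (objective: alternative).


-- ===== PORT A =====
-- 'for i in range(0, len(line)): if line[i] == "|": total += 1' then the if/elif cascade.
-- line[i] is always in range, so it is ported with pyGetD (default never used).
def correctFormat (line : String) : String :=
  let total : Int :=
    (PySem.List.pyRange 0 (PySem.Str.len line) 1).foldl
      (fun acc i => if PySem.List.pyGetD line.toList i ' ' == '|' then acc + 1 else acc) 0
  if total = 0 then String.ofList (line.toList ++ "|||".toList)
  else if total = 1 then String.ofList (line.toList ++ "||".toList)
  else if total = 2 then String.ofList (line.toList ++ "|".toList)
  else line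

-- ===== PORT B =====
-- Source B's 'missing(need, pos)': need is the recursion structure (Nat), pos the search start.
def altMissing (line : String) : Nat → Int → Nat
  | 0, _ => 0
  | n + 1, pos =>
      let i := PySem.Str.findFrom line "|" pos
      if i = -1 then n + 1 else altMissing line n (i + 1)

-- 'return line + "|" * missing(3, 0)'
def correctFormat_alt (line : String) : String :=
  String.ofList (line.toList ++ PySem.List.pyRepeat "|".toList ((altMissing line 3 0 : Nat) : Int))

-- ===== PRECONDITION & SPEC =====
def Spec_correctFormat (line : String) (out : String) : Prop := out = correctFormat_alt line
instance (line : String) (out : String) : Decidable (Spec_correctFormat line out) := by unfold Spec_correctFormat; infer_instance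

-- ===== CLAIM (what is proved, stated in full; the proofs are below) =====
def Claim_equal_correctFormat : Prop := ∀ (line : String), Dom_correctFormat line → Spec_correctFormat line (correctFormat line)

-- ===== LEMMAS AND PROOFS =====

theorem singleton_prefix_iff (c : Char) (t : List Char) : [c] <+: t ↔ t.head? = some c := by
  cases t with
  | nil => simp
  | cons x xs => simp [List.cons_prefix_iff, eq_comm]

-- a failed search means no bar remains
theorem find_bar_miss {s : List Char} (h : PySem.Chars.find s ['|'] = -1) :
    s.count '|' = 0 := by
  rw [PySem.Chars.find_eq_neg_one_iff] at h
  rw [List.count_eq_zero]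
  intro hmem
  exact h (by
    obtain ⟨u, v, rfl⟩ := List.append_of_mem hmem
    exact ⟨u, v, by simp⟩)

-- a successful search points at the first bar: one bar is consumed
theorem find_bar_hit {s : List Char} (h : 0 ≤ PySem.Chars.find s ['|']) :
    (PySem.Chars.find s ['|']).toNat < s.length ∧
    s.count '|' = (s.drop ((PySem.Chars.find s ['|']).toNat + 1)).count '|' + 1 := by
  obtain ⟨hpre, hmin⟩ := PySem.Chars.find_spec (sub := ['|']) h
  set j := (PySem.Chars.find s ['|']).toNat with hj
  rw [singleton_prefix_iff] at hpre
  have hjlt : j < s.length := by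
    by_contra hge
    rw [List.drop_eq_nil_of_le (Nat.le_of_not_lt hge)] at hpre
    simp at hpre
  refine ⟨hjlt, ?_⟩
  have hsplit : s = s.take j ++ s.drop j := (List.take_append_drop j s).symm
  have hdropj : s.drop j = '|' :: s.drop (j + 1) := by
    have h1 : s.drop j = s[j] :: s.drop (j + 1) := List.drop_eq_getElem_cons hjlt
    have h2 : s[j] = '|' := by
      have hh : (s.drop j).head? = s[j]? := List.head?_drop
      rw [hpre, List.getElem?_eq_getElem hjlt] at hh
      exact (Option.some_inj.mp hh.symm)
    rw [h1, h2]
  have htake0 : (s.take j).count '|' = 0 := by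
    rw [List.count_eq_zero]
    intro hc
    obtain ⟨i, hi, hci⟩ := List.mem_take_iff_getElem.mp hc
    have hij : i < j := lt_of_lt_of_le hi (min_le_left _ _)
    have hiL : i < s.length := lt_of_lt_of_le hi (min_le_right _ _)
    apply hmin i hij
    rw [singleton_prefix_iff, List.head?_drop, List.getElem?_eq_getElem hiL, hci]
  conv_lhs => rw [hsplit]
  rw [List.count_append, htake0, hdropj]
  simp [Nat.add_comm]

theorem altMissing_eq (line : String) (n : Nat) : ∀ (k : Nat), k ≤ line.toList.length →
    altMissing line n (k : Int) = n - min n ((line.toList.drop k).count '|') := by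
  induction n with
  | zero => intro k _; simp [altMissing]
  | succ n ih =>
    intro k hk
    rw [altMissing]
    simp only [PySem.Str.findFrom_eq]
    have hbar : ("|" : String).toList = ['|'] := rfl
    rw [hbar, PySem.Chars.findFrom_natCast line.toList ['|'] k hk]
    by_cases hmiss : PySem.Chars.find (line.toList.drop k) ['|'] = -1
    · rw [if_pos hmiss, if_pos rfl, find_bar_miss hmiss]
      omega
    · have hge : 0 ≤ PySem.Chars.find (line.toList.drop k) ['|'] := by
        have := PySem.Chars.neg_one_le_find (line.toList.drop k) ['|']
        omega
      set j' := PySem.Chars.find (line.toList.drop k) ['|'] with hj'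
      obtain ⟨hjlt, hcount⟩ := find_bar_hit hge
      rw [if_neg hmiss, if_neg (by omega)]
      have hcast : (k : Int) + j' + 1 = ((k + j'.toNat + 1 : Nat) : Int) := by
        push_cast; omega
      have hlen : k + j'.toNat + 1 ≤ line.toList.length := by
        have := List.length_drop (l := line.toList) (i := k)
        omega
      rw [hcast, ih (k + j'.toNat + 1) hlen]
      have hdd : line.toList.drop (k + j'.toNat + 1) = (line.toList.drop k).drop (j'.toNat + 1) := by
        rw [List.drop_drop]; ring_nf
      rw [hdd] at *
      omega

-- A's counting loop computes the number of bars
theorem correctFormat_total (line : String) :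
    (PySem.List.pyRange 0 (PySem.Str.len line) 1).foldl
      (fun acc i => if PySem.List.pyGetD line.toList i ' ' == '|' then acc + 1 else acc) (0 : Int)
    = (line.toList.count '|' : Int) := by
  have h := PySem.List.foldl_pyRange_zero_pyGetD line.toList ' '
      (fun acc c => if c == '|' then acc + 1 else acc) (0 : Int)
  simp only [PySem.Str.len, PySem.List.len_eq] at h ⊢
  rw [h, PySem.List.foldl_beq_add_one]
  omega

-- ===== VERDICT (by name: the statement is the Claim_ definition above) =====
theorem correctFormat_spec : Claim_equal_correctFormat := by
  intro line _
  unfold Spec_correctFormat correctFormat correctFormat_alt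
  have hmiss := altMissing_eq line 3 0 (Nat.zero_le _)
  simp only [Nat.cast_zero, List.drop_zero] at hmiss
  rw [hmiss, correctFormat_total]
  rw [show ("|" : String).toList = ['|'] from rfl, PySem.List.pyRepeat_singleton]
  match hc : line.toList.count '|' with
  | 0 => simp
  | 1 => simp
  | 2 => simp
  | (m + 3) =>
    have e0 : ¬((m : Int) + 3 = 0) := by omega
    have e1 : ¬((m : Int) + 3 = 1) := by omega
    have e2 : ¬((m : Int) + 3 = 2) := by omega
    push_cast
    rw [if_neg e0, if_neg e1, if_neg e2]
    simp [String.ofList_toList]
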